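-- pv_equiv track=rewrite | github.com/cirosantilli/project-euler-solutions | solvers/936.py | _multiset_u_coeff_exact_size
-- ===== SOURCE A (Python) =====
-- def _multiset_u_coeff_exact_size(A: list[int], m: int, max_d: int) -> list[int]:
--     """Return the x-series for the coefficient of u^m in
--
--         exp( sum_{k>=1} u^k/k * A(x^k) )
--
--     where A is an ordinary generating function in x (A[0] must be 0).
--
--     The return value is a list coeff[d] = [x^d] (u^m-coefficient).
--
--     Uses the standard recurrence for exp-series coefficients:
--       E_0 = 1
--       E_n = (1/n) * sum_{k=1..n} A(x^k) * E_{n-k}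
--
--     computed coefficient-by-coefficient in x.
--     """
--     # E[n][d] = [x^d] coefficient of u^n.
--     E = [[0] * (max_d + 1) for _ in range(m + 1)]
--     E[0][0] = 1
--
--     for d in range(1, max_d + 1):
--         max_n = min(m, d)  # need at least n positive-size elements to make size d
--         for n in range(1, max_n + 1):
--             acc = 0
--             for k in range(1, n + 1):
--                 # [x^d] A(x^k) * E[n-k]
--                 # A(x^k) has only terms x^{k*j} with coefficient A[j].
--                 dk = d // k
--                 Enk = E[n - k]
--                 for j in range(1, dk + 1):
--                     aj = A[j]
--                     if aj:
--                         acc += aj * Enk[d - k * j]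
--             # Division is exact in this combinatorial setting.
--             if acc % n != 0:
--                 raise ArithmeticError("non-integer multiset coefficient")
--             E[n][d] = acc // n
--
--     return E[m]
-- ===== SOURCE B (Python) =====
-- def _multiset_u_coeff_exact_size(A: list[int], m: int, max_d: int) -> list[int]:
--     """Top-down memoized recursion on the same exp-series recurrence:
--     E(0, d) = [d == 0];  E(n, d) = (1/n) * sum_{k=1..n} [x^d] A(x^k) * E(n-k).
--     Returns [E(m, d) for d in 0..max_d]."""
--     memo = [[None] * (max_d + 1) for _ in range(m + 1)]
--
--     def E(n: int, d: int) -> int: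
--         if n == 0:
--             return 1 if d == 0 else 0
--         v = memo[n][d]
--         if v is None:
--             acc = 0
--             # k > d contributes nothing: A(x^k) has no terms of degree <= d then
--             for k in range(1, min(n, d) + 1):
--                 for j in range(1, d // k + 1):
--                     acc += A[j] * E(n - k, d - k * j)
--             # division is exact (the series has integer coefficients)
--             v = acc // n
--             memo[n][d] = v
--         return v
--
--     E(m, max_d)  # prime the memo with the deepest call
--     return [E(m, d) for d in range(max_d + 1)]
-- ===== Notes on version B (the rewrite author's own statement) =====
-- stated objective: simpler
-- what changed: Replaces the bottom-up (m+1)x(max_d+1) table filled column-by-column with three nested index loops and an explicit divisibility guard by a short top-down memoized recursion E(n,d) on the same exp-series recurrence, computing each output coefficient directly.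
import Mathlib
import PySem

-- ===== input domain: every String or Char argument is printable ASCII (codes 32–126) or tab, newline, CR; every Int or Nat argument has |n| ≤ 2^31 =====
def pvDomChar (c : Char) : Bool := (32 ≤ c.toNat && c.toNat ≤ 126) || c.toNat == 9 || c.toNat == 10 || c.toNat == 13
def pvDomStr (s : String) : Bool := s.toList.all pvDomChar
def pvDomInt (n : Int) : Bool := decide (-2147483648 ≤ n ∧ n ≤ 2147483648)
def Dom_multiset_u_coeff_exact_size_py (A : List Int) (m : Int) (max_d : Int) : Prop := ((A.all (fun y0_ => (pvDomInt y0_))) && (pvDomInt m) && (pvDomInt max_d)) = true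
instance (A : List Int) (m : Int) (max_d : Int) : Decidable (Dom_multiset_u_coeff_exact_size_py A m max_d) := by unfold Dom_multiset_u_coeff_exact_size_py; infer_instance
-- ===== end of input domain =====

-- B replaces A's bottom-up (m+1)×(max_d+1) table, filled column-by-column by three nested
-- index loops, with a top-down recursion E(n,d) on the same exp-series recurrence (memoized
-- in Python; memoization does not change the value); equivalence is about the return value.

-- ===== PORT A =====
-- 'acc += aj * Enk[d - k*j]' guarded by 'if aj:'; the body of the n-loop.
-- A's 'if acc % n != 0: raise ArithmeticError' guard fires only when the division is inexact,
-- which does not happen here (A's own comment: "Division is exact in this combinatorial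
-- setting"); the port performs the same floor division 'acc // n' directly.
def pyInner (A : List Int) (d : Nat) (E : List (List Int)) (n : Nat) : List (List Int) :=
  let acc : Int :=
    (List.range' 1 n).foldl (fun acc k =>
      let dk := d / k
      let Enk := E.getD (n - k) ([] : List Int)
      (List.range' 1 dk).foldl (fun acc j =>
        let aj := A.getD j 0
        if aj ≠ 0 then acc + aj * Enk.getD (d - k * j) 0 else acc) acc) 0
  E.set n ((E.getD n []).set d (PySem.Int.floordiv acc n))

-- the body of the d-loop: 'max_n = min(m, d)' then the n-loop
def pyStep (A : List Int) (m : Int) (E : List (List Int)) (d : Nat) : List (List Int) :=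
  (List.range' 1 (min m (d : Int)).toNat).foldl (pyInner A d) E

def multiset_u_coeff_exact_size_py (A : List Int) (m : Int) (max_d : Int) : List Int :=
  -- E = [[0] * (max_d + 1) for _ in range(m + 1)]; E[0][0] = 1
  let E0 : List (List Int) := List.replicate (m + 1).toNat (List.replicate (max_d + 1).toNat 0)
  let E1 := E0.set 0 ((E0.getD 0 []).set 0 1)
  -- for d in range(1, max_d + 1): …
  let Ef := (List.range' 1 max_d.toNat).foldl (pyStep A m) E1
  Ef.getD m.toNat []

-- ===== PORT B =====
-- the recursive E(n, d) of Source B (the memo table only caches; the value is this recursion)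
def altE (A : List Int) (n : Nat) (d : Nat) : Int :=
  if _h : n = 0 then (if d = 0 then 1 else 0)
  else
    -- 'for k in range(1, min(n, d) + 1)'
    PySem.Int.floordiv
      ((List.range' 1 (min n d)).attach.foldl (fun acc k =>
        (List.range' 1 (d / k.1)).foldl (fun acc j =>
          acc + (A.getD j 0) * altE A (n - k.1) (d - k.1 * j)) acc) 0)
      n
decreasing_by
  rcases List.mem_range'.mp k.2 with ⟨i, hi, hk⟩
  omega

def multiset_u_coeff_exact_size_py_alt (A : List Int) (m : Int) (max_d : Int) : List Int :=
  (List.range (max_d + 1).toNat).map (fun d => altE A m.toNat d)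

-- ===== PRECONDITION & SPEC =====
-- Pre_ excludes exactly the inputs where Python A raises: m < 0 or max_d < 0 (IndexError on
-- E[0][0] / E[m]) and, when the d-loop runs (m ≥ 1 and max_d ≥ 1), a list A shorter than
-- max_d + 1 (IndexError on A[j]).
def Pre_multiset_u_coeff_exact_size_py (A : List Int) (m : Int) (max_d : Int) : Prop :=
  0 ≤ m ∧ 0 ≤ max_d ∧ (1 ≤ m → 1 ≤ max_d → max_d < (A.length : Int))
instance (A : List Int) (m : Int) (max_d : Int) : Decidable (Pre_multiset_u_coeff_exact_size_py A m max_d) := by unfold Pre_multiset_u_coeff_exact_size_py; infer_instance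

def pvWitness_multiset_u_coeff_exact_size_py : List Int × Int × Int := ([0, 1, 1, 1], 2, 3)

def Spec_multiset_u_coeff_exact_size_py (A : List Int) (m : Int) (max_d : Int) (out : List Int) : Prop := out = multiset_u_coeff_exact_size_py_alt A m max_d
instance (A : List Int) (m : Int) (max_d : Int) (out : List Int) : Decidable (Spec_multiset_u_coeff_exact_size_py A m max_d out) := by unfold Spec_multiset_u_coeff_exact_size_py; infer_instance

-- ===== CLAIM (what is proved, stated in full; the proofs are below) =====
def Claim_equal_multiset_u_coeff_exact_size_py : Prop := ∀ (A : List Int) (m : Int) (max_d : Int), Dom_multiset_u_coeff_exact_size_py A m max_d → Pre_multiset_u_coeff_exact_size_py A m max_d → Spec_multiset_u_coeff_exact_size_py A m max_d (multiset_u_coeff_exact_size_py A m max_d)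

-- ===== LEMMAS AND PROOFS =====

-- unfold altE at a positive first argument, with the 'attach' removed
theorem altE_pos (A : List Int) (n d : Nat) (hn : n ≠ 0) :
    altE A n d = PySem.Int.floordiv
      ((List.range' 1 (min n d)).foldl (fun acc k =>
        (List.range' 1 (d / k)).foldl (fun acc j =>
          acc + (A.getD j 0) * altE A (n - k) (d - k * j)) acc) 0) n := by
  rw [altE]
  simp [hn]

-- fold whose body ignores its element (used to collapse loops all of whose iterations are no-ops)
theorem foldl_id {α : Type} (l : List α) (b : Int) : l.foldl (fun acc _ => acc) b = b := by
  induction l generalizing b <;> simp [List.foldl, *]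


theorem altE_col0 (A : List Int) (n : Nat) : altE A n 0 = if n = 0 then 1 else 0 := by
  rcases Nat.eq_zero_or_pos n with h | h
  · subst h; simp [altE]
  · rw [altE_pos A n 0 (by omega), if_neg (by omega)]
    simp [PySem.Int.floordiv_eq_ediv_of_pos (by exact_mod_cast h : (0:Int) < n)]

-- E_n has no terms below degree n (each A(x^k) starts at degree k)
theorem altE_lt (A : List Int) (n : Nat) : ∀ d, d < n → altE A n d = 0 := by
  induction n using Nat.strong_induction_on with
  | _ n ih =>
    intro d hdn
    have hn : n ≠ 0 := by omega
    rw [altE_pos A n d hn, Nat.min_eq_right (Nat.le_of_lt hdn)]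
    have hacc : (List.range' 1 d).foldl (fun acc k =>
        (List.range' 1 (d / k)).foldl (fun acc j =>
          acc + (A.getD j 0) * altE A (n - k) (d - k * j)) acc) (0 : Int) = 0 := by
      rw [PySem.List.foldl_congr_mem _ _ (fun acc _ => acc) _ ?_]
      · exact foldl_id _ _
      · intro acc k hk
        rcases List.mem_range'.mp hk with ⟨i, hi, rfl⟩
        rw [PySem.List.foldl_congr_mem _ _ (fun acc _ => acc) _ ?_]
        · exact foldl_id _ _
        · intro a j hj
          rcases List.mem_range'.mp hj with ⟨t, ht, rfl⟩
          have hjd : (1 + 1 * t) ≤ d / (1 + 1 * i) := by omega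
          have hkd : (1 + 1 * i) * (1 + 1 * t) ≤ d := by
            rw [Nat.mul_comm]
            exact (Nat.le_div_iff_mul_le (by omega)).mp hjd
          have hk1 : 1 + 1 * i ≤ (1 + 1 * i) * (1 + 1 * t) :=
            Nat.le_mul_of_pos_right _ (by omega)
          have hz : altE A (n - (1 + 1 * i)) (d - (1 + 1 * i) * (1 + 1 * t)) = 0 :=
            ih _ (by omega) _ (by omega)
          rw [hz]; ring
    rw [hacc]
    simp [PySem.Int.floordiv_eq_ediv_of_pos (by omega : (0:Int) < (n:Int))]

-- the acc computed from a table whose already-final columns agree with altE equals altE's acc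
theorem acc_eq (A : List Int) (M D d n : Nat) (E : List (List Int))
    (hnM : n ≤ M) (hdD : d ≤ D)
    (hread : ∀ r c, r ≤ M → c ≤ D → c < d → (E.getD r []).getD c 0 = altE A r c) :
    (List.range' 1 n).foldl (fun acc k =>
      (List.range' 1 (d / k)).foldl (fun acc j =>
        if A.getD j 0 ≠ 0 then acc + A.getD j 0 * ((E.getD (n - k) []).getD (d - k * j) 0)
        else acc) acc) (0 : Int)
    = (List.range' 1 n).foldl (fun acc k =>
      (List.range' 1 (d / k)).foldl (fun acc j =>
        acc + (A.getD j 0) * altE A (n - k) (d - k * j)) acc) 0 := by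
  apply PySem.List.foldl_congr_mem
  intro acc k hk
  rcases List.mem_range'.mp hk with ⟨i, hi, rfl⟩
  apply PySem.List.foldl_congr_mem
  intro a j hj
  rcases List.mem_range'.mp hj with ⟨t, ht, rfl⟩
  by_cases haj : A.getD (1 + 1 * t) 0 = 0
  · rw [if_neg (not_not_intro haj), haj]; ring
  · rw [if_pos haj]
    have hjd : (1 + 1 * t) ≤ d / (1 + 1 * i) := by omega
    have hkd : (1 + 1 * i) * (1 + 1 * t) ≤ d := by
      rw [Nat.mul_comm]
      exact (Nat.le_div_iff_mul_le (k := 1 + 1 * i) (by omega)).mp hjd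
    have h1 : 1 ≤ (1 + 1 * i) * (1 + 1 * t) := Nat.one_le_iff_ne_zero.mpr (by positivity)
    rw [hread (n - (1 + 1 * i)) (d - (1 + 1 * i) * (1 + 1 * t)) (by omega) (by omega)
      (by omega)]

-- loop invariants: state of the table after finishing column d0 (outer), resp. after the
-- first n0 rows of column d (inner)
def tabOK (A : List Int) (M D d0 : Nat) (E : List (List Int)) : Prop :=
  E.length = M + 1 ∧ (∀ r, r < M + 1 → (E.getD r []).length = D + 1) ∧
  ∀ r c, r ≤ M → c ≤ D →
    (E.getD r []).getD c 0 = (if c ≤ d0 ∨ r = 0 then altE A r c else 0)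

def innOK (A : List Int) (M D d n0 : Nat) (E : List (List Int)) : Prop :=
  E.length = M + 1 ∧ (∀ r, r < M + 1 → (E.getD r []).length = D + 1) ∧
  ∀ r c, r ≤ M → c ≤ D →
    (E.getD r []).getD c 0 =
      (if c < d ∨ r = 0 ∨ (c = d ∧ r ≤ n0) then altE A r c else 0)

-- List.setD-style description of getD after set
theorem getD_set' {α : Type} (l : List α) (i j : Nat) (a dflt : α) :
    (l.set i a).getD j dflt = if i = j ∧ i < l.length then a else l.getD j dflt := by
  by_cases h : i = j ∧ i < l.length
  · obtain ⟨rfl, hlt⟩ := h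
    rw [if_pos ⟨rfl, hlt⟩, List.getD_eq_getElem?_getD, List.getElem?_set, if_pos rfl,
      if_pos hlt, Option.getD_some]
  · rw [if_neg h]
    rcases eq_or_ne i j with rfl | hij
    · have hge : l.length ≤ i := by
        rcases Nat.lt_or_ge i l.length with h' | h' 
        · exact absurd ⟨rfl, h'⟩ h
        · exact h'
      rw [List.getD_eq_getElem?_getD, List.getElem?_set, if_pos rfl, if_neg (by omega),
        Option.getD_none, List.getD_eq_getElem?_getD, List.getElem?_eq_none hge,
        Option.getD_none]
    · rw [List.getD_eq_getElem?_getD, List.getElem?_set, if_neg hij,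
      ← List.getD_eq_getElem?_getD]

theorem inn_of_tab (A : List Int) (M D d : Nat) (E : List (List Int)) (hd : 1 ≤ d)
    (h : tabOK A M D (d - 1) E) : innOK A M D d 0 E := by
  refine ⟨h.1, h.2.1, ?_⟩
  intro r c hr hc
  rw [h.2.2 r c hr hc]
  by_cases h1 : c ≤ d - 1 ∨ r = 0 <;>
    by_cases h2 : c < d ∨ r = 0 ∨ (c = d ∧ r ≤ 0) <;>
      simp only [h1, h2, if_pos, if_false] <;> omega

theorem tab_of_inn (A : List Int) (M D d : Nat) (E : List (List Int))
    (h : innOK A M D d (min M d) E) : tabOK A M D d E := by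
  refine ⟨h.1, h.2.1, ?_⟩
  intro r c hr hc
  rw [h.2.2 r c hr hc]
  by_cases h1 : c < d ∨ r = 0 ∨ (c = d ∧ r ≤ min M d)
  · rw [if_pos h1, if_pos (by omega)]
  · rw [if_neg h1]
    by_cases h2 : c ≤ d ∨ r = 0
    · -- c = d and min M d < r ≤ M, so d < r and the altE value is itself 0
      rw [if_pos h2, altE_lt A r c (by omega)]
    · rw [if_neg h2]

theorem inn_step (A : List Int) (M D d n0 : Nat) (E : List (List Int))
    (hdD : d ≤ D) (hn : n0 + 1 ≤ min M d)
    (h : innOK A M D d n0 E) : innOK A M D d (n0 + 1) (pyInner A d E (n0 + 1)) := by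
  obtain ⟨hlen, hrow, htab⟩ := h
  have hread : ∀ r c, r ≤ M → c ≤ D → c < d → (E.getD r []).getD c 0 = altE A r c := by
    intro r c hr hc hcd
    rw [htab r c hr hc, if_pos (Or.inl hcd)]
  have hacc := acc_eq A M D d (n0 + 1) E (by omega) hdD hread
  have hval : PySem.Int.floordiv
      ((List.range' 1 (n0 + 1)).foldl (fun acc k =>
        (List.range' 1 (d / k)).foldl (fun acc j =>
          if A.getD j 0 ≠ 0 then acc + A.getD j 0 * ((E.getD (n0 + 1 - k) []).getD (d - k * j) 0)
          else acc) acc) (0 : Int)) (((n0 + 1 : Nat)) : Int)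
      = altE A (n0 + 1) d := by
    rw [hacc, altE_pos A (n0 + 1) d (by omega), Nat.min_eq_left (by omega)]
  have hEn : n0 + 1 < E.length := by omega
  have hrowlen : (E.getD (n0 + 1) []).length = D + 1 := hrow (n0 + 1) (by omega)
  unfold pyInner
  simp only []
  refine ⟨by rw [List.length_set]; exact hlen, ?_, ?_⟩
  · intro r hrlt
    rw [getD_set']
    by_cases hcase : n0 + 1 = r ∧ n0 + 1 < E.length
    · rw [if_pos hcase, List.length_set]; exact hrowlen
    · rw [if_neg hcase]; exact hrow r hrlt
  · intro r c hr hc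
    rw [getD_set']
    by_cases hcase : n0 + 1 = r ∧ n0 + 1 < E.length
    · obtain ⟨hre, -⟩ := hcase
      subst hre
      rw [if_pos ⟨rfl, hEn⟩, getD_set']
      by_cases hc2 : d = c ∧ d < (E.getD (n0 + 1) []).length
      · obtain ⟨hdc, -⟩ := hc2
        subst hdc
        rw [if_pos ⟨rfl, by omega⟩, hval, if_pos (by omega)]
      · have hcd : c ≠ d := fun hcd => hc2 ⟨hcd.symm, by omega⟩
        rw [if_neg hc2, htab (n0 + 1) c (by omega) hc]
        by_cases hcond : c < d ∨ n0 + 1 = 0 ∨ (c = d ∧ n0 + 1 ≤ n0)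
        · rw [if_pos hcond, if_pos (by omega)]
        · rw [if_neg hcond, if_neg (by omega)]
    · rw [if_neg hcase]
      have hrne : r ≠ n0 + 1 := fun hre => hcase ⟨hre.symm, hEn⟩
      rw [htab r c hr hc]
      by_cases hcond : c < d ∨ r = 0 ∨ (c = d ∧ r ≤ n0)
      · rw [if_pos hcond, if_pos (by omega)]
      · rw [if_neg hcond, if_neg (by omega)]

theorem inn_fold (A : List Int) (M D d : Nat) (E : List (List Int))
    (hdD : d ≤ D) (h : innOK A M D d 0 E) :
    ∀ t, t ≤ min M d → innOK A M D d t ((List.range' 1 t).foldl (pyInner A d) E) := by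
  intro t
  induction t with
  | zero => intro _; simpa using h
  | succ t ih =>
    intro ht
    rw [List.range'_concat, List.foldl_append]
    simp only [List.foldl_cons, List.foldl_nil]
    have h1 : (1 : Nat) + 1 * t = t + 1 := by omega
    rw [h1]
    exact inn_step A M D d t _ hdD ht (ih (by omega))

theorem tab_fold (A : List Int) (m : Int) (M D : Nat) (hm : m = (M : Int))
    (E : List (List Int)) (h : tabOK A M D 0 E) :
    ∀ t, t ≤ D → tabOK A M D t ((List.range' 1 t).foldl (pyStep A m) E) := by
  intro t
  induction t with
  | zero => intro _; simpa using h
  | succ t ih =>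
    intro ht
    rw [List.range'_concat, List.foldl_append]
    simp only [List.foldl_cons, List.foldl_nil]
    have h1 : (1 : Nat) + 1 * t = t + 1 := by omega
    rw [h1]
    have hmin : (min m ((t + 1 : Nat) : Int)).toNat = min M (t + 1) := by subst hm; omega
    unfold pyStep
    rw [hmin]
    refine tab_of_inn A M D (t + 1) _ (inn_fold A M D (t + 1) _ (by omega)
      (inn_of_tab A M D (t + 1) _ (by omega) ?_) (min M (t + 1)) (le_refl _))
    simpa using ih (by omega)

theorem tab_init (A : List Int) (M D : Nat) :
    tabOK A M D 0
      ((List.replicate (M + 1) (List.replicate (D + 1) (0 : Int))).set 0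
        (((List.replicate (M + 1) (List.replicate (D + 1) (0 : Int))).getD 0 []).set 0 1)) := by
  have hrow0 : (List.replicate (M + 1) (List.replicate (D + 1) (0 : Int))).getD 0 []
      = List.replicate (D + 1) (0 : Int) := List.getD_replicate _ (by omega)
  rw [hrow0]
  have hlenE : (List.replicate (M + 1) (List.replicate (D + 1) (0 : Int))).length = M + 1 :=
    List.length_replicate
  refine ⟨by rw [List.length_set]; exact hlenE, ?_, ?_⟩
  · intro r hr
    rw [getD_set']
    by_cases hcase : 0 = r ∧ 0 < (List.replicate (M + 1) (List.replicate (D + 1) (0 : Int))).length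
    · rw [if_pos hcase, List.length_set, List.length_replicate]
    · rw [if_neg hcase, List.getD_replicate _ (by omega), List.length_replicate]
  · intro r c hr hc
    rw [getD_set']
    by_cases hcase : 0 = r ∧ 0 < (List.replicate (M + 1) (List.replicate (D + 1) (0 : Int))).length
    · obtain ⟨hre, -⟩ := hcase
      subst hre
      rw [if_pos ⟨rfl, by omega⟩, getD_set']
      by_cases hc2 : 0 = c ∧ 0 < (List.replicate (D + 1) (0 : Int)).length
      · obtain ⟨hce, -⟩ := hc2
        subst hce
        rw [if_pos ⟨rfl, by simp⟩, if_pos (by omega)]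
        simp [altE]
      · have hcne : c ≠ 0 := fun hce => hc2 ⟨hce.symm, by simp⟩
        rw [if_neg hc2, List.getD_replicate _ (by omega), if_pos (Or.inr rfl)]
        simp [altE, hcne]
    · have hrne : r ≠ 0 := fun hre => hcase ⟨hre.symm, by omega⟩
      rw [if_neg hcase, List.getD_replicate _ (by omega), List.getD_replicate _ (by omega)]
      by_cases hcond : c ≤ 0 ∨ r = 0
      · have hc0 : c = 0 := by omega
        subst hc0
        rw [if_pos hcond, altE_col0, if_neg hrne]
      · rw [if_neg hcond]

-- ===== VERDICT (by name: the statement is the Claim_ definition above) =====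
theorem multiset_u_coeff_exact_size_py_spec : Claim_equal_multiset_u_coeff_exact_size_py := by
  intro A m max_d _hdom hpre
  obtain ⟨hm, hd, -⟩ := hpre
  unfold Spec_multiset_u_coeff_exact_size_py
  unfold multiset_u_coeff_exact_size_py multiset_u_coeff_exact_size_py_alt
  simp only []
  have h1 : (m + 1).toNat = m.toNat + 1 := by omega
  have h2 : (max_d + 1).toNat = max_d.toNat + 1 := by omega
  rw [h1, h2]
  obtain ⟨hlen, hrow, hent⟩ :=
    tab_fold A m m.toNat max_d.toNat (by omega) _ (tab_init A m.toNat max_d.toNat)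
      max_d.toNat (le_refl _)
  apply List.ext_getElem
  · rw [hrow m.toNat (by omega)]
    simp
  · intro i hi1 hi2
    have hiD : i ≤ max_d.toNat := by
      rw [hrow m.toNat (by omega)] at hi1
      omega
    have he := hent m.toNat i (le_refl _) hiD
    rw [if_pos (Or.inl hiD)] at he
    rw [List.getElem_map, List.getElem_range]
    exact (List.getD_eq_getElem _ 0 hi1).symm.trans he
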